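-- pv_equiv track=rewrite | github.com/NguyenTinh98/NER_MOCKPROJECT | utils/cut256.py | cutting_subword
-- ===== SOURCE A (Python) =====
-- def isNotSubword(x, idx, sub = '##'):
--     if sub == '##':
--         return sub not in x[idx] and idx < len(x) - 1 and sub not in x[idx+1]
--     elif sub == '@@':
--         return sub not in x[idx] and idx > 0 and sub not in x[idx-1]
--     return sub in x[idx] and idx < len(x) - 1 and sub in x[idx+1]
--
-- def cutting_subword(X, sub = '##', size=256):
--     res_X = []
--     punct = '.!?'
--     st = 0
--     cur = 0
--     while (st < len(X)-size):
--         flag = True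
--         for i in range(st+size-1, st-1, -1):
--             if X[i] in punct and isNotSubword(X, i, sub):
--                 cur = i+1
--                 flag = False
--                 break
--         if flag:
--             for i in range(st+size-1, st-1, -1):
--                 if isNotSubword(X, i, sub):
--                     cur = i+1
--                     break
--         if st == cur:
--             cur += size
--         res_X.append(X[st: cur])
--         st = cur
--     res_X.append(X[cur:])
--     return res_X
-- ===== SOURCE B (Python) =====
-- def cutting_subword(X, sub='##', size=256):
--     # Precompute last-break-position tables once, then cut each window by table lookup (no inner backward scans).
--     n = len(X)
--     has = [sub in t for t in X]
--     if sub == '##':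
--         ok = [not has[i] and i + 1 < n and not has[i + 1] for i in range(n)]
--     elif sub == '@@':
--         ok = [not has[i] and i > 0 and not has[i - 1] for i in range(n)]
--     else:
--         ok = [has[i] and i + 1 < n and has[i + 1] for i in range(n)]
--     okp = [ok[i] and X[i] in '.!?' for i in range(n)]
--     prevB, prevP = [], []
--     lastB = lastP = -1
--     for i in range(n):
--         if ok[i]:
--             lastB = i
--         if okp[i]:
--             lastP = i
--         prevB.append(lastB)
--         prevP.append(lastP)
--     res = []
--     st = 0
--     while st < n - size:
--         j = prevP[st + size - 1]
--         if j < st: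
--             j = prevB[st + size - 1]
--         cur = j + 1 if j >= st else st + size
--         res.append(X[st:cur])
--         st = cur
--     res.append(X[st:])
--     return res
-- ===== Notes on version B (the rewrite author's own statement) =====
-- stated objective: alternative
-- what changed: A rescans up to `size` tokens backwards inside every window (twice: punctuation breaks, then any break); B precomputes, per index, whether it is a valid break / punctuation break and the last such position up to each index, then cuts each window with two table lookups.
import Mathlib
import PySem

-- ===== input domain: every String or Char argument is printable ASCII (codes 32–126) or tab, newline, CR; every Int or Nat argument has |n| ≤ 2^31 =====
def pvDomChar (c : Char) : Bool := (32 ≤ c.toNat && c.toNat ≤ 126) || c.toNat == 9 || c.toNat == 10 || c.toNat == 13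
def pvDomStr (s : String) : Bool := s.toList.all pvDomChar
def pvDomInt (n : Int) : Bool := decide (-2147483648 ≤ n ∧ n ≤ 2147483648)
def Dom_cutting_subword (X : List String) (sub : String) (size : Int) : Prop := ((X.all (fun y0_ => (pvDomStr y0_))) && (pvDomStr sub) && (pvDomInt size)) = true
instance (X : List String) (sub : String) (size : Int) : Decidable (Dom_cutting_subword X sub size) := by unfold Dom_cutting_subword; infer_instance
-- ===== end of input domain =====

-- B replaces A's per-window backward scans by one precompute of last-break-position
-- tables and a table lookup per window (objective: alternative algorithm).

-- ===== PORT A =====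
-- x[j]: every access A makes is in range on Pre_ inputs; the .getD "" totalizes only.
def pyElem (x : List String) (j : Int) : String := (PySem.List.pyGet? x j).getD ""

def isNotSubwordP (x : List String) (idx : Int) (sub : String) : Bool :=
  if sub == "##" then
    !(PySem.Str.isIn sub (pyElem x idx)) && decide (idx < (x.length : Int) - 1) && !(PySem.Str.isIn sub (pyElem x (idx + 1)))
  else if sub == "@@" then
    !(PySem.Str.isIn sub (pyElem x idx)) && decide (0 < idx) && !(PySem.Str.isIn sub (pyElem x (idx - 1)))
  else
    (PySem.Str.isIn sub (pyElem x idx)) && decide (idx < (x.length : Int) - 1) && (PySem.Str.isIn sub (pyElem x (idx + 1)))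

-- the while loop; fuel X.length+1 bounds the iteration count (st strictly increases on Pre_ inputs)
def goA (X : List String) (sub : String) (size : Int) : Nat → Int → Int → List (List String) → List (List String)
  | 0, _st, cur, res => res ++ [PySem.List.slice X (some cur) none]
  | fuel + 1, st, cur, res =>
    if st < (X.length : Int) - size then
      let cur1 :=
        match (PySem.List.pyRange (st + size - 1) (st - 1) (-1)).find?
            (fun i => PySem.Str.isIn (pyElem X i) ".!?" && isNotSubwordP X i sub) with
        | some i => i + 1
        | none =>
          match (PySem.List.pyRange (st + size - 1) (st - 1) (-1)).find?
              (fun i => isNotSubwordP X i sub) with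
          | some i => i + 1
          | none => cur
      let cur2 := if st == cur1 then cur1 + size else cur1
      goA X sub size fuel cur2 cur2 (res ++ [PySem.List.slice X (some st) (some cur2)])
    else res ++ [PySem.List.slice X (some cur) none]

def cutting_subword (X : List String) (sub : String) (size : Int) : List (List String) :=
  goA X sub size (X.length + 1) 0 0 []

-- ===== PORT B =====
def goB (X : List String) (size : Int) (prevB prevP : List Int) : Nat → Int → List (List String) → List (List String)
  | 0, st, res => res ++ [PySem.List.slice X (some st) none]
  | fuel + 1, st, res =>
    if st < (X.length : Int) - size then
      let j0 := PySem.List.pyGetD prevP (st + size - 1) (-1)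
      let j := if j0 < st then PySem.List.pyGetD prevB (st + size - 1) (-1) else j0
      let cur := if st ≤ j then j + 1 else st + size
      goB X size prevB prevP fuel cur (res ++ [PySem.List.slice X (some st) (some cur)])
    else res ++ [PySem.List.slice X (some st) none]

def hasList (X : List String) (sub : String) : List Bool :=
  X.map (fun t => PySem.Str.isIn sub t)

def okList (X : List String) (sub : String) : List Bool :=
  if sub == "##" then
    (List.range X.length).map (fun i =>
      !(hasList X sub).getD i false && decide (i + 1 < X.length) && !(hasList X sub).getD (i + 1) false)
  else if sub == "@@" then
    (List.range X.length).map (fun i =>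
      !(hasList X sub).getD i false && decide (0 < i) && !(hasList X sub).getD (i - 1) false)
  else
    (List.range X.length).map (fun i =>
      (hasList X sub).getD i false && decide (i + 1 < X.length) && (hasList X sub).getD (i + 1) false)

def okpList (X : List String) (sub : String) : List Bool :=
  (List.range X.length).map (fun i =>
    (okList X sub).getD i false && PySem.Str.isIn (X.getD i "") ".!?")

-- single pass building the last-break-so-far tables (prevB, prevP, lastB, lastP)
def prevTables (X : List String) (sub : String) : List Int × List Int × Int × Int :=
  (List.range X.length).foldl
    (fun (s : List Int × List Int × Int × Int) i =>
      (s.1 ++ [if (okList X sub).getD i false then (i : Int) else s.2.2.1],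
       s.2.1 ++ [if (okpList X sub).getD i false then (i : Int) else s.2.2.2],
       if (okList X sub).getD i false then (i : Int) else s.2.2.1,
       if (okpList X sub).getD i false then (i : Int) else s.2.2.2))
    ([], [], -1, -1)

def cutting_subword_alt (X : List String) (sub : String) (size : Int) : List (List String) :=
  goB X size (prevTables X sub).1 (prevTables X sub).2.1 (X.length + 1) 0 []

-- ===== PRECONDITION & SPEC =====
-- Pre_ excludes only inputs where A never returns: for size ≤ 0 (except X = [] with size = 0)
-- the while loop cannot advance st and A diverges.
def Pre_cutting_subword (X : List String) (_sub : String) (size : Int) : Prop :=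
  1 ≤ size ∨ (X = [] ∧ size = 0)
instance (X : List String) (sub : String) (size : Int) : Decidable (Pre_cutting_subword X sub size) := by
  unfold Pre_cutting_subword; infer_instance

def pvWitness_cutting_subword : List String × String × Int := (["a", ".", "b##", "c"], "##", 2)

def Spec_cutting_subword (X : List String) (sub : String) (size : Int) (out : List (List String)) : Prop := out = cutting_subword_alt X sub size
instance (X : List String) (sub : String) (size : Int) (out : List (List String)) : Decidable (Spec_cutting_subword X sub size out) := by unfold Spec_cutting_subword; infer_instance

-- ===== CLAIM (what is proved, stated in full; the proofs are below) =====
def Claim_equal_cutting_subword : Prop := ∀ (X : List String) (sub : String) (size : Int), Dom_cutting_subword X sub size → Pre_cutting_subword X sub size → Spec_cutting_subword X sub size (cutting_subword X sub size)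

-- ===== LEMMAS AND PROOFS =====

-- last index k < m with p k, else -1
def lastBelow (p : Nat → Bool) : Nat → Int
  | 0 => -1
  | e + 1 => if p e then (e : Int) else lastBelow p e

lemma lastBelow_lt (p : Nat → Bool) (m : Nat) : lastBelow p m < (m : Int) := by
  induction m with
  | zero => simp [lastBelow]
  | succ e ih => simp only [lastBelow]; split <;> omega

lemma lastBelow_congr (p q : Nat → Bool) (m : Nat) (h : ∀ k, k < m → p k = q k) :
    lastBelow p m = lastBelow q m := by
  induction m with
  | zero => rfl
  | succ e ih =>
    simp only [lastBelow, h e (Nat.lt_succ_self e)]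
    rw [ih (fun k hk => h k (Nat.lt_succ_of_lt hk))]

lemma find_desc (p : Int → Bool) (st e : Nat) (h : st ≤ e) :
    (PySem.List.pyRange (e : Int) ((st : Int) - 1) (-1)).find? p
      = if (st : Int) ≤ lastBelow (fun k => p (k : Int)) (e + 1)
        then some (lastBelow (fun k => p (k : Int)) (e + 1)) else none := by
  induction e with
  | zero =>
    interval_cases st
    rw [PySem.List.pyRange_neg_one_cons (by omega)]
    rw [PySem.List.pyRange_neg_one_eq_nil (by omega)]
    simp only [List.find?, lastBelow]
    cases hp : p 0 <;> simp
  | succ e ih =>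
    rw [PySem.List.pyRange_neg_one_cons (by push_cast; omega)]
    simp only [List.find?]
    cases hp : p ((e + 1 : Nat) : Int) with
    | true =>
      simp only [lastBelow, hp]
      simp
      omega
    | false =>
      simp only [lastBelow, hp]
      have hc : ((e + 1 : Nat) : Int) - 1 = (e : Int) := by push_cast; ring
      rw [hc]
      rcases Nat.lt_or_ge st (e + 1) with hlt | hge
      · rw [ih (by omega)]
        rfl
      · have hst : st = e + 1 := by omega
        subst hst
        rw [PySem.List.pyRange_neg_one_eq_nil (by push_cast; omega)]
        have := lastBelow_lt (fun k => p (k : Int)) (e + 1)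
        simp only [List.find?_nil]
        rw [if_neg (by exact_mod_cast Int.not_le.mpr this)]

lemma foldl_prev (p q : Nat → Bool) (n : Nat) :
    (List.range n).foldl
      (fun (s : List Int × List Int × Int × Int) i =>
        (s.1 ++ [if p i then (i : Int) else s.2.2.1],
         s.2.1 ++ [if q i then (i : Int) else s.2.2.2],
         if p i then (i : Int) else s.2.2.1,
         if q i then (i : Int) else s.2.2.2))
      ([], [], -1, -1)
    = ((List.range n).map (fun e => lastBelow p (e + 1)),
       (List.range n).map (fun e => lastBelow q (e + 1)),
       lastBelow p n, lastBelow q n) := by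
  induction n with
  | zero => rfl
  | succ m ih =>
    rw [List.range_succ, List.foldl_append, ih]
    simp [lastBelow]

lemma hasAt_eq (X : List String) (sub : String) (k : Nat) (hk : k < X.length) :
    (hasList X sub).getD k false = PySem.Str.isIn sub (pyElem X (k : Int)) := by
  simp [hasList, pyElem, PySem.List.pyGet?_ofNat X k hk, List.getD,
    List.getElem?_eq_getElem hk]

lemma ok_at (X : List String) (sub : String) (k : Nat) (hk : k < X.length) :
    (okList X sub).getD k false = isNotSubwordP X (k : Int) sub := by
  have hmid : decide (k + 1 < X.length) = decide ((k : Int) < (X.length : Int) - 1) := by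
    simp only [decide_eq_decide]; omega
  unfold okList isNotSubwordP
  by_cases h1 : sub == "##"
  · rw [if_pos h1, if_pos h1, PySem.List.getD_map_range _ _ _ _ hk, hasAt_eq X sub k hk, hmid]
    by_cases hk1 : k + 1 < X.length
    · rw [hasAt_eq X sub (k + 1) hk1]
      norm_cast
    · have : decide ((k : Int) < (X.length : Int) - 1) = false := by
        simp only [decide_eq_false_iff_not]; omega
      rw [this]; simp
  · rw [if_neg h1, if_neg h1]
    by_cases h2 : sub == "@@"
    · rw [if_pos h2, if_pos h2, PySem.List.getD_map_range _ _ _ _ hk, hasAt_eq X sub k hk]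
      by_cases hk0 : 0 < k
      · have hcast : (k : Int) - 1 = ((k - 1 : Nat) : Int) := by omega
        rw [hcast, hasAt_eq X sub (k - 1) (by omega)]
        have : decide (0 < k) = decide (0 < (k : Int)) := by simp only [decide_eq_decide]; omega
        rw [this]
      · have hz : k = 0 := by omega
        subst hz; simp
    · rw [if_neg h2, if_neg h2, PySem.List.getD_map_range _ _ _ _ hk, hasAt_eq X sub k hk, hmid]
      by_cases hk1 : k + 1 < X.length
      · rw [hasAt_eq X sub (k + 1) hk1]
        norm_cast
      · have : decide ((k : Int) < (X.length : Int) - 1) = false := by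
          simp only [decide_eq_false_iff_not]; omega
        rw [this]; simp

lemma okp_at (X : List String) (sub : String) (k : Nat) (hk : k < X.length) :
    (okpList X sub).getD k false
      = (PySem.Str.isIn (pyElem X (k : Int)) ".!?" && isNotSubwordP X (k : Int) sub) := by
  unfold okpList
  rw [PySem.List.getD_map_range _ _ _ _ hk, ok_at X sub k hk]
  have hX : X.getD k "" = pyElem X (k : Int) := by
    simp [pyElem, PySem.List.pyGet?_ofNat X k hk, List.getD, List.getElem?_eq_getElem hk]
  rw [hX, Bool.and_comm]

lemma prevB_at (X : List String) (sub : String) (e : Nat) (he : e < X.length) :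
    PySem.List.pyGetD (prevTables X sub).1 (e : Int) (-1)
      = lastBelow (fun k => isNotSubwordP X (k : Int) sub) (e + 1) := by
  unfold prevTables
  rw [foldl_prev, PySem.List.pyGetD_natCast]
  simp only
  rw [PySem.List.getD_map_range _ _ _ _ he]
  exact lastBelow_congr _ _ _ (fun k hkk => ok_at X sub k (by omega))

lemma prevP_at (X : List String) (sub : String) (e : Nat) (he : e < X.length) :
    PySem.List.pyGetD (prevTables X sub).2.1 (e : Int) (-1)
      = lastBelow (fun k => PySem.Str.isIn (pyElem X (k : Int)) ".!?" && isNotSubwordP X (k : Int) sub) (e + 1) := by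
  unfold prevTables
  rw [foldl_prev, PySem.List.pyGetD_natCast]
  simp only
  rw [PySem.List.getD_map_range _ _ _ _ he]
  exact lastBelow_congr _ _ _ (fun k hkk => okp_at X sub k (by omega))

lemma goAB (X : List String) (sub : String) (size : Int) (hsz : 1 ≤ size) :
    ∀ (fuel : Nat) (st : Int) (res : List (List String)), 0 ≤ st →
      goA X sub size fuel st st res
        = goB X size (prevTables X sub).1 (prevTables X sub).2.1 fuel st res := by
  intro fuel
  induction fuel with
  | zero => intro st res _; rfl
  | succ f ih =>
    intro st res hst
    by_cases hcond : st < (X.length : Int) - size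
    · obtain ⟨sN, hsN⟩ : ∃ m : Nat, st = (m : Int) := ⟨st.toNat, (Int.toNat_of_nonneg hst).symm⟩
      subst hsN
      obtain ⟨eN, heN⟩ : ∃ m : Nat, (sN : Int) + size - 1 = (m : Int) :=
        ⟨((sN : Int) + size - 1).toNat, (Int.toNat_of_nonneg (by omega)).symm⟩
      have hse : sN ≤ eN := by omega
      have helen : eN < X.length := by omega
      simp only [goA, goB, if_pos hcond]
      rw [heN, find_desc _ sN eN hse, find_desc _ sN eN hse,
        prevP_at X sub eN helen, prevB_at X sub eN helen]
      set LP := lastBelow (fun k => PySem.Str.isIn (pyElem X (k : Int)) ".!?" && isNotSubwordP X (k : Int) sub) (eN + 1) with hLP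
      set LB := lastBelow (fun k => isNotSubwordP X (k : Int) sub) (eN + 1) with hLB
      by_cases h1 : (sN : Int) ≤ LP
      · rw [if_pos h1]
        have hne : (((sN : Int)) == LP + 1) = false := by
          simp only [beq_eq_false_iff_ne]; omega
        simp only [hne, Bool.false_eq_true, if_false, if_neg (by omega : ¬ LP < (sN : Int)),
          if_pos h1]
        exact ih (LP + 1) _ (by omega)
      · rw [if_neg h1]
        by_cases h2 : (sN : Int) ≤ LB
        · rw [if_pos h2]
          have hne : (((sN : Int)) == LB + 1) = false := by
            simp only [beq_eq_false_iff_ne]; omega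
          simp only [hne, Bool.false_eq_true, if_false, if_pos (by omega : LP < (sN : Int)),
            if_pos h2]
          exact ih (LB + 1) _ (by omega)
        · rw [if_neg h2]
          simp only [beq_self_eq_true, if_true, if_pos (by omega : LP < (sN : Int)),
            if_neg h2]
          exact ih ((sN : Int) + size) _ (by omega)
    · simp only [goA, goB, if_neg hcond]

theorem cutting_subword_spec : Claim_equal_cutting_subword := by
  intro X sub size hdom hpre
  unfold Spec_cutting_subword
  rcases hpre with hsz | ⟨hX, hs⟩
  · unfold cutting_subword cutting_subword_alt
    exact goAB X sub size hsz (X.length + 1) 0 [] le_rfl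
  · subst hX; subst hs
    rfl
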